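-- pv_equiv track=rewrite | github.com/xm3van/cfmm-routing | cfmm_routing/plots.py | _parse_route
-- ===== SOURCE A (Python) =====
-- def _parse_route(uid: str) -> str:
--     """
--     Expected uid formats:
--       - univ2-DIRECT:0-1
--       - univ2-R{t}-H{e}:{a}-{b}
--     Returns route key: "DIRECT" or "R{t}".
--     """
--     if "DIRECT" in uid:
--         return "DIRECT"
--
--     try:
--         left = uid.split(":")[0]     # "univ2-R3-H1"
--         parts = left.split("-")      # ["univ2", "R3", "H1"]
--         r = next(p for p in parts if p.startswith("R"))
--         return r
--     except Exception:
--         # fallback: treat each uid as its own route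
--         return uid
-- ===== SOURCE B (Python) =====
-- def _parse_route(uid: str) -> str:
--     # Single left-to-right character scan: find the first token (tokens start at
--     # position 0 or right after '-') beginning with 'R' before the first ':',
--     # and return it; no split lists are built.
--     if "DIRECT" in uid:
--         return "DIRECT"
--     at_start = True
--     n = len(uid)
--     i = 0
--     while i < n:
--         c = uid[i]
--         if c == ':':
--             break
--         if at_start and c == 'R':
--             j = i
--             while j < n and uid[j] != '-' and uid[j] != ':':
--                 j += 1
--             return uid[i:j]
--         at_start = (c == '-')
--         i += 1
--     return uid
-- ===== Notes on version B (the rewrite author's own statement) =====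
-- stated objective: alternative
-- what changed: A splits the uid on ':' and then on '-' into lists and scans the parts for the first one starting with 'R'; B makes one left-to-right character scan that tracks token starts and returns the first 'R'-token before the first ':' directly, building no intermediate lists.
import Mathlib
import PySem

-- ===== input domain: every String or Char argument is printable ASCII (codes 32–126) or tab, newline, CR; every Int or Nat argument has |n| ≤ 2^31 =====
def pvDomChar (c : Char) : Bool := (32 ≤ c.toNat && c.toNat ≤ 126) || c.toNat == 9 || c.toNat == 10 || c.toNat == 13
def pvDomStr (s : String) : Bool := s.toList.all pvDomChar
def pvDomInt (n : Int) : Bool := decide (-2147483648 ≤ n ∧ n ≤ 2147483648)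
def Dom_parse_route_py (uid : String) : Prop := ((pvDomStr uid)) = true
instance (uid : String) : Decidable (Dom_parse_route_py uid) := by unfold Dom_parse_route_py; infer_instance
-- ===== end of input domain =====

-- B replaces A's split-into-lists-then-scan-tokens parse by a single character scan; objective: alternative (one pass, no intermediate lists).

-- ===== PORT A =====
-- uid.split(":")[0]: the separator ":" is nonempty, so split is PySem.Chars.splitOn;
-- the [0] lookup is ported as pyGet? with the (unreachable) none case going to the
-- except-branch, exactly like next()'s StopIteration does.
def parse_route_py (uid : String) : String :=
  if PySem.Str.isIn "DIRECT" uid then "DIRECT"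
  else
    match PySem.List.pyGet? (PySem.Chars.splitOn uid.toList [':']) 0 with
    | none => uid   -- except branch (IndexError; never happens: split is nonempty)
    | some left =>
      let parts := PySem.Chars.splitOn left ['-']
      match parts.find? (fun p => PySem.Chars.startswith p ['R']) with
      | some r => String.ofList r
      | none => uid   -- except branch (StopIteration from next)

-- ===== PORT B =====
-- Source B's inner while loop uid[i:j]: take chars until '-' or ':' (j stops there)
def pvTok (cs : List Char) : List Char :=
  cs.takeWhile (fun d => !(d == '-' || d == ':'))

-- Source B's outer while loop: scan, tracking whether we are at a token start
def pvScan : List Char → Bool → Option (List Char)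
  | [], _ => none
  | c :: rest, atStart =>
    if c == ':' then none
    else if atStart && c == 'R' then some (pvTok (c :: rest))
    else pvScan rest (c == '-')

def parse_route_py_alt (uid : String) : String :=
  if PySem.Str.isIn "DIRECT" uid then "DIRECT"
  else
    match pvScan uid.toList true with
    | some r => String.ofList r
    | none => uid

-- ===== PRECONDITION & SPEC =====
def Spec_parse_route_py (uid : String) (out : String) : Prop := out = parse_route_py_alt uid
instance (uid : String) (out : String) : Decidable (Spec_parse_route_py uid out) := by unfold Spec_parse_route_py; infer_instance

-- ===== CLAIM (what is proved, stated in full; the proofs are below) =====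
def Claim_equal_parse_route_py : Prop := ∀ (uid : String), Dom_parse_route_py uid → Spec_parse_route_py uid (parse_route_py uid)

-- ===== LEMMAS AND PROOFS =====

-- (first part before the next c, remaining parts) of splitting on the single char c
def pvSplitP (c : Char) : List Char → List Char × List (List Char)
  | [] => ([], [])
  | a :: rest =>
      let p := pvSplitP c rest
      if a = c then ([], p.1 :: p.2) else (a :: p.1, p.2)

theorem pvGo_eq (c : Char) (fuel : Nat) (l cur : List Char) (acc : List (List Char))
    (h : l.length < fuel) :
    PySem.Chars.splitOn.go [c] fuel l cur acc
      = acc.reverse ++ ((cur.reverse ++ (pvSplitP c l).1) :: (pvSplitP c l).2) := by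
  induction fuel generalizing l cur acc with
  | zero => omega
  | succ fuel ih =>
    cases l with
    | nil =>
      rw [PySem.Chars.splitOn.go.eq_def]
      simp [pvSplitP]
    | cons a rest =>
      rw [PySem.Chars.splitOn.go.eq_def]
      have hlen : rest.length < fuel := by simpa using Nat.lt_of_succ_lt_succ h
      by_cases hac : a = c
      · subst hac
        simp only [List.isPrefixOf, BEq.rfl, Bool.true_and, List.isPrefixOf_nil_left,
          if_pos, List.length_cons, List.drop_succ_cons, List.drop_zero,
          List.length_nil]
        rw [ih _ _ _ hlen]
        simp [pvSplitP]
      · have hpre : [c].isPrefixOf (a :: rest) = false := by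
          simp [List.isPrefixOf]
          exact fun hh => (hac hh.symm).elim
        simp only [hpre, Bool.false_eq_true, if_neg, not_false_iff]
        rw [ih _ _ _ hlen]
        simp [pvSplitP, hac]

theorem pvSplitOn_single (c : Char) (l : List Char) :
    PySem.Chars.splitOn l [c] = (pvSplitP c l).1 :: (pvSplitP c l).2 := by
  have := pvGo_eq c (l.length + 1) l [] [] (by omega)
  simpa [PySem.Chars.splitOn] using this

theorem pvSplitP_fst (c : Char) (l : List Char) :
    (pvSplitP c l).1 = l.takeWhile (fun d => !(d == c)) := by
  induction l with
  | nil => rfl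
  | cons a rest ih =>
    by_cases h : a = c
    · have hb : (a == c) = true := by simp [h]
      simp [pvSplitP, h, List.takeWhile, hb]
    · have hb : (a == c) = false := by simp [h]
      simp [pvSplitP, h, List.takeWhile, hb, ih]

theorem pvTok_eq (l : List Char) :
    (pvSplitP '-' (l.takeWhile (fun d => !(d == ':')))).1 = pvTok l := by
  induction l with
  | nil => rfl
  | cons a rest ih =>
    by_cases hc : a = ':'
    · have hb : (a == ':') = true := by simp [hc]
      simp [pvTok, List.takeWhile, hb, pvSplitP]
    · have hb1 : (a == ':') = false := by simp [hc]
      by_cases hd : a = '-'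
      · have hb2 : (a == '-') = true := by simp [hd]
        simp [pvTok, List.takeWhile, hb1, hb2, pvSplitP, hd]
      · have hb2 : (a == '-') = false := by simp [hd]
        simp [pvTok, List.takeWhile, hb1, hb2, pvSplitP, hd, ih]

-- find-first-token-starting-with-R, as A computes it
def pvFindR (ps : List (List Char)) : Option (List Char) :=
  ps.find? (fun p => PySem.Chars.startswith p ['R'])

theorem pvStartswithR (p : List Char) :
    PySem.Chars.startswith p ['R'] = (p.head? == some 'R') := by
  cases p with
  | nil => rfl
  | cons a rest => simp [PySem.Chars.startswith, List.isPrefixOf, BEq.comm]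

-- the heart: the single scan equals find-first-R over the split parts
theorem pvScan_eq (l : List Char) (atStart : Bool) :
    pvScan l atStart
      = (let p := pvSplitP '-' (l.takeWhile (fun d => !(d == ':')));
         if atStart then pvFindR (p.1 :: p.2) else pvFindR p.2) := by
  induction l generalizing atStart with
  | nil =>
    cases atStart <;> simp [pvScan, pvSplitP, pvFindR, pvStartswithR]
  | cons c rest ih =>
    by_cases hc : c = ':'
    · have hb : (c == ':') = true := by simp [hc]
      cases atStart <;>
        simp [pvScan, hb, List.takeWhile, pvSplitP, pvFindR, pvStartswithR]
    · have hb1 : (c == ':') = false := by simp [hc]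
      by_cases hd : c = '-'
      · have hb2 : (c == '-') = true := by simp [hd]
        have hb3 : (c == 'R') = false := by simp [hd]
        cases atStart <;>
          simp [pvScan, hb1, hb2, hb3, hd, List.takeWhile, pvSplitP, pvFindR,
            pvStartswithR, ih, List.find?]
      · have hb2 : (c == '-') = false := by simp [hd]
        by_cases hR : c = 'R'
        · have hb3 : (c == 'R') = true := by simp [hR]
          cases atStart with
          | true =>
            simp [pvScan, hb1, hb2, hb3, hd, List.takeWhile, pvSplitP, pvFindR,
              pvStartswithR, List.find?, pvTok_eq, pvTok]
          | false =>
            simp [pvScan, hb1, hb2, hb3, hd, List.takeWhile, pvSplitP, pvFindR, ih]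
        · have hb3 : (c == 'R') = false := by simp [hR]
          cases atStart <;>
            simp [pvScan, hb1, hb2, hb3, hd, List.takeWhile, pvSplitP, pvFindR,
              pvStartswithR, ih, List.find?]

-- list[0] on a nonempty list returns the head
theorem pvPyGet0 {A : Type} (a : A) (t : List A) :
    PySem.List.pyGet? (a :: t) 0 = some a := by
  simp [PySem.List.pyGet?, PySem.List.pyIdx?]

-- ===== VERDICT (by name: the statement is the Claim_ definition above) =====
theorem parse_route_py_spec : Claim_equal_parse_route_py := by
  intro uid _
  unfold Spec_parse_route_py parse_route_py parse_route_py_alt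
  by_cases hD : PySem.Str.isIn "DIRECT" uid = true
  · rw [if_pos hD, if_pos hD]
  · rw [if_neg hD, if_neg hD]
    simp only [pvSplitOn_single, pvPyGet0, pvScan_eq, pvFindR, pvSplitP_fst, if_true]
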